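-- pv_equiv track=rewrite | github.com/crongcrong222/Programming_Study | 13Programmers/PG_Graph_ex_03.py | solution
-- ===== SOURCE A (Python) =====
-- from collections import defaultdict
--
-- dx = [-1, -1, 0, 1, 1, 1, 0, -1]
--
-- dy = [0, 1, 1, 1, 0, -1, -1, -1]
--
-- def solution(arrows):
--     answer = 0
--     check = defaultdict(int)
--     visit = defaultdict(int)
--     preArrow = (0, 0)
--     visit[preArrow] = 1
--
--     for arr in arrows:
--         for i in range(2):
--             # 2배로 늘리기
--             nowArrow = (preArrow[0] + dx[arr], preArrow[1] + dy[arr])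
--             if (visit[nowArrow] and not (preArrow, nowArrow) in check):
--                 answer += 1
--             visit[nowArrow] = 1
--             check[(preArrow, nowArrow)] = 1
--             check[(nowArrow, preArrow)] = 1
--             preArrow = nowArrow
--
--     return answer
-- ===== SOURCE B (Python) =====
-- # Euler-formula re-implementation: walk the doubled path once, collecting the
-- # set of visited vertices and the set of undirected edges (stored canonically),
-- # then return len(E) - len(V) + 1 for the connected traversal graph.
-- dx = [-1, -1, 0, 1, 1, 1, 0, -1]
-- dy = [0, 1, 1, 1, 0, -1, -1, -1]
--
-- def solution(arrows):
--     pos = (0, 0)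
--     verts = {pos}
--     edges = set()
--     for a in arrows:
--         for _ in range(2):
--             now = (pos[0] + dx[a], pos[1] + dy[a])
--             edges.add((pos, now) if pos <= now else (now, pos))
--             verts.add(now)
--             pos = now
--     return len(edges) - len(verts) + 1
-- ===== Notes on version B (the rewrite author's own statement) =====
-- stated objective: alternative
-- what changed: Replaces the per-step crossing counter (visited check + directed-edge dict test inside the walk) with one pass that only accumulates the vertex set and the canonical undirected edge set, returning len(E) - len(V) + 1 by Euler's formula for the connected traversal graph.
import Mathlib
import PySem

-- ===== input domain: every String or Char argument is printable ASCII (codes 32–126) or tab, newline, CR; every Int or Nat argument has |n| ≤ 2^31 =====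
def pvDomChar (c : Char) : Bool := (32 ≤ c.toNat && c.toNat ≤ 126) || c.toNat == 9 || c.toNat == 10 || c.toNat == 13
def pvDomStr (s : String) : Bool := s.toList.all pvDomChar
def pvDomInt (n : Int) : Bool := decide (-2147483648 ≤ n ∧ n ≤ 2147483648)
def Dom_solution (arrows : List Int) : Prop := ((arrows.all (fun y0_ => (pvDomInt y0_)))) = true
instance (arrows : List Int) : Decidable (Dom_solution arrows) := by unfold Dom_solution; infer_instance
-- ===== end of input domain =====

-- B replaces A's in-walk crossing counter by collecting the vertex set and the canonical
-- undirected edge set and returning |E| - |V| + 1 (Euler's formula); same single pass.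

-- ===== PORT A =====
def pvDx : List Int := [-1, -1, 0, 1, 1, 1, 0, -1]
def pvDy : List Int := [0, 1, 1, 1, 0, -1, -1, -1]

-- A's state: (answer, check, visit, preArrow)
def pvStA := Int × PySem.Dict ((Int × Int) × (Int × Int)) Int × PySem.Dict (Int × Int) Int × (Int × Int)

-- one inner iteration of A's 'for i in range(2)' body; dx[arr] via pyGet? (Pre_ excludes none)
def pvStepA (st : pvStA) (arr : Int) : pvStA :=
  let pre := st.2.2.2
  let now : Int × Int := (pre.1 + ((PySem.List.pyGet? pvDx arr).getD 0),
                          pre.2 + ((PySem.List.pyGet? pvDy arr).getD 0))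
  (if st.2.2.1.getD now 0 != 0 && !(st.2.1.contains (pre, now)) then st.1 + 1 else st.1,
   (st.2.1.insert (pre, now) 1).insert (now, pre) 1,
   st.2.2.1.insert now 1,
   now)

def solution (arrows : List Int) : Int :=
  (arrows.foldl (fun st arr => (List.range 2).foldl (fun st _ => pvStepA st arr) st)
    ((0 : Int), PySem.Dict.empty, PySem.Dict.empty.insert ((0 : Int), (0 : Int)) 1,
     ((0 : Int), (0 : Int)))).1

-- ===== PORT B =====
-- canonical undirected edge: Python's '(pos, now) if pos <= now else (now, pos)' (tuple lex <=)
def pvCanon (p q : Int × Int) : (Int × Int) × (Int × Int) :=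
  if p.1 < q.1 ∨ (p.1 = q.1 ∧ p.2 ≤ q.2) then (p, q) else (q, p)

-- B's state: (verts, edges, pos)
def pvStB := PySem.Set (Int × Int) × PySem.Set ((Int × Int) × (Int × Int)) × (Int × Int)

def pvStepB (st : pvStB) (arr : Int) : pvStB :=
  let pos := st.2.2
  let now : Int × Int := (pos.1 + ((PySem.List.pyGet? pvDx arr).getD 0),
                          pos.2 + ((PySem.List.pyGet? pvDy arr).getD 0))
  (PySem.Set.add st.1 now, PySem.Set.add st.2.1 (pvCanon pos now), now)

def solution_alt (arrows : List Int) : Int :=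
  let fin := arrows.foldl (fun st arr => (List.range 2).foldl (fun st _ => pvStepB st arr) st)
    (PySem.Set.ofList [((0 : Int), (0 : Int))], (PySem.Set.empty : PySem.Set ((Int × Int) × (Int × Int))),
     ((0 : Int), (0 : Int)))
  PySem.Set.len fin.2.1 - PySem.Set.len fin.1 + 1

-- ===== PRECONDITION & SPEC =====
-- A (and B) index dx/dy by each arrow: outside -8..7 Python raises IndexError.
def Pre_solution (arrows : List Int) : Prop := ∀ a ∈ arrows, -8 ≤ a ∧ a ≤ 7
instance (arrows : List Int) : Decidable (Pre_solution arrows) := by unfold Pre_solution; infer_instance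

def pvWitness_solution : List Int := [4, 6, 0, 2]

def Spec_solution (arrows : List Int) (out : Int) : Prop := out = solution_alt arrows
instance (arrows : List Int) (out : Int) : Decidable (Spec_solution arrows out) := by unfold Spec_solution; infer_instance

-- ===== CLAIM (what is proved, stated in full; the proofs are below) =====
def Claim_equal_solution : Prop := ∀ (arrows : List Int), Dom_solution arrows → Pre_solution arrows → Spec_solution arrows (solution arrows)

-- ===== LEMMAS AND PROOFS =====

lemma pvCanon_comm (p q : Int × Int) : pvCanon p q = pvCanon q p := by
  unfold pvCanon
  obtain ⟨p1, p2⟩ := p; obtain ⟨q1, q2⟩ := q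
  dsimp only
  split_ifs with h1 h2 h2 <;> first | rfl | (simp_all [Prod.ext_iff]; omega)

lemma pvCanon_eq_iff (p q a b : Int × Int) :
    pvCanon p q = pvCanon a b ↔ (p = a ∧ q = b) ∨ (p = b ∧ q = a) := by
  constructor
  · intro h
    unfold pvCanon at h
    split_ifs at h <;> simp_all [Prod.ext_iff]
  · rintro (⟨rfl, rfl⟩ | ⟨rfl, rfl⟩)
    · rfl
    · exact pvCanon_comm p q

-- the invariant tying A's loop state to B's loop state
def pvInv (sa : pvStA) (sb : pvStB) : Prop :=
  sa.2.2.2 = sb.2.2 ∧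
  sb.2.2 ∈ sb.1 ∧
  (∀ v : Int × Int, sa.2.2.1.getD v 0 ≠ 0 ↔ v ∈ sb.1) ∧
  (∀ p q : Int × Int, sa.2.1.contains (p, q) = true ↔ pvCanon p q ∈ sb.2.1) ∧
  (∀ p q : Int × Int, pvCanon p q ∈ sb.2.1 → p ∈ sb.1 ∧ q ∈ sb.1) ∧
  sa.1 = PySem.Set.len sb.2.1 - PySem.Set.len sb.1 + 1

lemma pvStep_inv (sa : pvStA) (sb : pvStB) (arr : Int) (h : pvInv sa sb) :
    pvInv (pvStepA sa arr) (pvStepB sb arr) := by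
  obtain ⟨a, check, visit, pre⟩ := sa
  obtain ⟨V, E, pos⟩ := sb
  obtain ⟨h1, h2, h3, h4, h5, h6⟩ := h
  dsimp only at h1 h2 h3 h4 h5 h6
  subst h1
  unfold pvStepA pvStepB pvInv
  dsimp only
  generalize hG : ((pre.1 + ((PySem.List.pyGet? pvDx arr).getD 0) : Int),
                   (pre.2 + ((PySem.List.pyGet? pvDy arr).getD 0) : Int)) = now
  refine ⟨rfl, ?_, ?_, ?_, ?_, ?_⟩
  · simp [PySem.Set.mem_add]
  · intro v
    rw [PySem.Dict.getD_insert, PySem.Set.mem_add]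
    by_cases hv : v = now <;> simp [hv, h3 v]
  · intro p q
    rw [PySem.Dict.contains_insert, PySem.Dict.contains_insert]
    rw [show (pvCanon p q ∈ PySem.Set.add E (pvCanon pre now)) ↔
          (pvCanon p q ∈ E ∨ pvCanon p q = pvCanon pre now) from PySem.Set.mem_add _ _ _]
    rw [pvCanon_eq_iff]
    constructor
    · intro hc
      rcases Bool.or_eq_true_iff.mp hc with hc | hc
      · right; right
        have := (beq_iff_eq).mp hc
        exact ⟨congrArg Prod.fst this, congrArg Prod.snd this⟩
      rcases Bool.or_eq_true_iff.mp hc with hc | hc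
      · right; left
        have := (beq_iff_eq).mp hc
        exact ⟨congrArg Prod.fst this, congrArg Prod.snd this⟩
      · left; exact (h4 p q).mp hc
    · rintro (hc | ⟨rfl, rfl⟩ | ⟨rfl, rfl⟩)
      · simp [(h4 p q).mpr hc]
      · simp
      · simp
  · intro p q hm
    rcases (PySem.Set.mem_add _ _ _).mp hm with hm | hm
    · obtain ⟨hp, hq⟩ := h5 p q hm
      exact ⟨(PySem.Set.mem_add _ _ _).mpr (Or.inl hp), (PySem.Set.mem_add _ _ _).mpr (Or.inl hq)⟩
    · rcases (pvCanon_eq_iff p q pre now).mp hm with ⟨rfl, rfl⟩ | ⟨rfl, rfl⟩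
      · exact ⟨(PySem.Set.mem_add _ _ _).mpr (Or.inl h2), (PySem.Set.mem_add _ _ _).mpr (Or.inr rfl)⟩
      · exact ⟨(PySem.Set.mem_add _ _ _).mpr (Or.inr rfl), (PySem.Set.mem_add _ _ _).mpr (Or.inl h2)⟩
  · by_cases hn : now ∈ V
    · by_cases he : pvCanon pre now ∈ E
      · have hb : (visit.getD now 0 != 0) = true := by
          simpa [bne_iff_ne] using (h3 now).mpr hn
        have hc : check.contains (pre, now) = true := (h4 pre now).mpr he
        rw [PySem.Set.add_of_mem hn, PySem.Set.add_of_mem he]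
        simp [hb, hc, h6]
      · have hb : (visit.getD now 0 != 0) = true := by
          simpa [bne_iff_ne] using (h3 now).mpr hn
        have hc : check.contains (pre, now) = false := by
          rcases hx : check.contains (pre, now) with _ | _
          · rfl
          · exact absurd ((h4 pre now).mp hx) he
        rw [PySem.Set.add_of_mem hn, PySem.Set.add_of_not_mem he]
        simp [hb, hc, h6, PySem.Set.len]
        omega
    · have he : pvCanon pre now ∉ E := fun he => hn (h5 pre now he).2
      have hb : (visit.getD now 0 != 0) = false := by
        have hz : visit.getD now 0 = 0 := by
          by_contra hx; exact hn ((h3 now).mp hx)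
        simp [hz]
      rw [PySem.Set.add_of_not_mem hn, PySem.Set.add_of_not_mem he]
      simp [hb, h6, PySem.Set.len]

lemma pvFold_inv (arrows : List Int) (sa : pvStA) (sb : pvStB) (h : pvInv sa sb) :
    pvInv (arrows.foldl (fun st arr => (List.range 2).foldl (fun st _ => pvStepA st arr) st) sa)
          (arrows.foldl (fun st arr => (List.range 2).foldl (fun st _ => pvStepB st arr) st) sb) := by
  induction arrows generalizing sa sb with
  | nil => exact h
  | cons a rest ih =>
      simp only [List.foldl_cons]
      apply ih
      have h2 : (List.range 2) = [0, 1] := by decide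
      rw [h2]
      simp only [List.foldl_cons, List.foldl_nil]
      exact pvStep_inv _ _ _ (pvStep_inv _ _ _ h)

lemma pvInv_init :
    pvInv ((0 : Int), PySem.Dict.empty, PySem.Dict.empty.insert ((0 : Int), (0 : Int)) 1, ((0 : Int), (0 : Int)))
          (PySem.Set.ofList [((0 : Int), (0 : Int))], (PySem.Set.empty : PySem.Set ((Int × Int) × (Int × Int))),
           ((0 : Int), (0 : Int))) := by
  refine ⟨rfl, by decide, ?_, ?_, ?_, by decide⟩
  · intro v
    rw [PySem.Dict.getD_insert]
    by_cases hv : v = ((0 : Int), (0 : Int)) <;>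
      simp [hv, PySem.Dict.getD_empty, PySem.Set.ofList]
  · intro p q
    simp [PySem.Dict.contains_empty, PySem.Set.empty]
  · intro p q hm
    simp [PySem.Set.empty] at hm

-- ===== VERDICT (by name: the statement is the Claim_ definition above) =====
theorem solution_spec : Claim_equal_solution := by
  intro arrows _ _
  unfold Spec_solution solution solution_alt
  exact (pvFold_inv arrows _ _ pvInv_init).2.2.2.2.2
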